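-- pv_equiv track=rewrite | github.com/longshuicui/information_extraction | util.py | get_relations_set
-- ===== SOURCE A (Python) =====
-- def get_relations_set(dataset):
--     relations=[]
--     for line in dataset:
--         for token in line:
--             for relation in token:
--                 relations.append(relation)
--     relations=sorted(list(set(relations)))
--     return relations
-- ===== SOURCE B (Python) =====
-- def get_relations_set(dataset):
--     result = []
--     for line in dataset:
--         for token in line:
--             for r in token:
--                 lo, hi = 0, len(result)
--                 while lo < hi:
--                     mid = (lo + hi) // 2
--                     if result[mid] < r:
--                         lo = mid + 1
--                     else:
--                         hi = mid
--                 if lo == len(result) or result[lo] != r: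
--                     result.insert(lo, r)
--     return result
-- ===== Notes on version B (the rewrite author's own statement) =====
-- stated objective: alternative
-- what changed: Instead of collecting everything, hashing into a set and sorting, B maintains a sorted duplicate-free result online: each relation is located by a hand-written binary search and inserted at its position only if absent, so no sort pass and no hash set exist at all.
import Mathlib
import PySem

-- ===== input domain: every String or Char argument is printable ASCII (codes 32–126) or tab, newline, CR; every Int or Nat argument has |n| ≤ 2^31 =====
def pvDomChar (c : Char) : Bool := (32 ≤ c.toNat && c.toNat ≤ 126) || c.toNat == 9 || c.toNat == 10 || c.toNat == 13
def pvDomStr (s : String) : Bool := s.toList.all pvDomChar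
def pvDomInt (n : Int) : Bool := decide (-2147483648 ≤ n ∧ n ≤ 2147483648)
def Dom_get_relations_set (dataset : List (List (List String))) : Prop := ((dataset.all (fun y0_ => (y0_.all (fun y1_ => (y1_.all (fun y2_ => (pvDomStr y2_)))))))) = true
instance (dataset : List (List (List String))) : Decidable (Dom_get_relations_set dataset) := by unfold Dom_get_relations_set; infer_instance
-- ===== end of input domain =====

-- B keeps the result sorted and duplicate-free ONLINE: each relation is located by a
-- hand-written binary search and inserted only if absent — no sort pass and no hash set
-- (objective: alternative).

-- ===== PORT A =====
def get_relations_set (dataset : List (List (List String))) : List String :=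
  -- the three nested 'for' loops appending each relation
  let relations : List String :=
    dataset.foldl (fun acc line =>
      line.foldl (fun acc token =>
        token.foldl (fun acc relation => acc ++ [relation]) acc) acc) []
  -- relations = sorted(list(set(relations)))
  PySem.List.sorted (PySem.Set.ofList relations) (fun x => x) false

-- ===== PORT B =====
-- the 'while lo < hi' binary-search loop of Source B; result[mid] is in range whenever
-- lo < hi ≤ result.length, so getD is exact there
def bsLoop (result : List String) (r : String) (lo hi : Nat) : Nat :=
  if lo < hi then
    let mid := (lo + hi) / 2
    if result.getD mid "" < r then bsLoop result r (mid + 1) hi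
    else bsLoop result r lo mid
  else lo
termination_by hi - lo
decreasing_by all_goals omega

-- the body of the innermost 'for r in token' loop of Source B
def insertStep (result : List String) (r : String) : List String :=
  let lo := bsLoop result r 0 result.length
  -- if lo == len(result) or result[lo] != r: result.insert(lo, r)
  if lo = result.length ∨ result.getD lo "" ≠ r then
    result.take lo ++ r :: result.drop lo   -- result.insert(lo, r) with lo ≤ len
  else result

def get_relations_set_alt (dataset : List (List (List String))) : List String :=
  dataset.foldl (fun result line =>
    line.foldl (fun result token =>
      token.foldl insertStep result) result) []

-- ===== PRECONDITION & SPEC =====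
def Spec_get_relations_set (dataset : List (List (List String))) (out : List String) : Prop := out = get_relations_set_alt dataset
instance (dataset : List (List (List String))) (out : List String) : Decidable (Spec_get_relations_set dataset out) := by unfold Spec_get_relations_set; infer_instance

-- ===== CLAIM (what is proved, stated in full; the proofs are below) =====
def Claim_equal_get_relations_set : Prop := ∀ (dataset : List (List (List String))), Dom_get_relations_set dataset → Spec_get_relations_set dataset (get_relations_set dataset)

-- ===== LEMMAS AND PROOFS =====

-- A's nested append loops produce the flat concatenation.
theorem foldl_append_singleton (xs : List String) (acc : List String) :
    xs.foldl (fun a r => a ++ [r]) acc = acc ++ xs := by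
  induction xs generalizing acc with
  | nil => simp
  | cons x t ih => rw [List.foldl_cons, ih]; simp

theorem foldl_line (ts : List (List String)) (a : List String) :
    ts.foldl (fun acc token => token.foldl (fun acc r => acc ++ [r]) acc) a
    = a ++ ts.flatMap (fun token => token) := by
  induction ts generalizing a with
  | nil => simp
  | cons t rs ih => rw [List.foldl_cons, foldl_append_singleton, ih]; simp

theorem flatA_eq (dataset : List (List (List String))) :
    dataset.foldl (fun acc line =>
      line.foldl (fun acc token =>
        token.foldl (fun acc relation => acc ++ [relation]) acc) acc) []
    = dataset.flatMap (fun line => line.flatMap (fun token => token)) := by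
  suffices h : ∀ acc : List String,
      dataset.foldl (fun acc line =>
        line.foldl (fun acc token =>
          token.foldl (fun acc relation => acc ++ [relation]) acc) acc) acc
      = acc ++ dataset.flatMap (fun line => line.flatMap (fun token => token)) by
    simpa using h []
  induction dataset with
  | nil => simp
  | cons line rest ih =>
    intro acc
    rw [List.foldl_cons, foldl_line, ih]
    simp

-- B's triple fold is a single fold over the flattened list.
theorem foldB_eq (dataset : List (List (List String))) :
    get_relations_set_alt dataset
    = (dataset.flatMap (fun line => line.flatMap (fun token => token))).foldl insertStep [] := by
  unfold get_relations_set_alt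
  suffices h : ∀ (res : List String),
      dataset.foldl (fun result line =>
        line.foldl (fun result token => token.foldl insertStep result) result) res
      = (dataset.flatMap (fun line => line.flatMap (fun token => token))).foldl insertStep res by
    simpa using h []
  induction dataset with
  | nil => simp
  | cons line rest ih =>
    intro res
    rw [List.foldl_cons, ih, List.flatMap_cons, List.foldl_append]
    congr 1
    induction line generalizing res with
    | nil => simp
    | cons t ts ihl => rw [List.foldl_cons, ihl, List.flatMap_cons, List.foldl_append]

-- take/drop at the takeWhile boundary
theorem take_len_takeWhile (p : String → Bool) (res : List String) :
    res.take (res.takeWhile p).length = res.takeWhile p := by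
  induction res with
  | nil => simp
  | cons x t ih =>
    by_cases h : p x <;> simp [h, ih]

theorem drop_len_takeWhile (p : String → Bool) (res : List String) :
    res.drop (res.takeWhile p).length = res.dropWhile p := by
  induction res with
  | nil => simp
  | cons x t ih =>
    by_cases h : p x <;> simp [h, ih]

theorem len_split (p : String → Bool) (res : List String) :
    res.length = (res.takeWhile p).length + (res.dropWhile p).length := by
  induction res with
  | nil => simp
  | cons x t ih =>
    by_cases h : p x <;> simp [h, ih] <;> omega

-- Python's result[n] read as a total getD equals the headD of the drop
theorem getD_eq_headD_drop (res : List String) (n : Nat) :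
    res.getD n "" = (res.drop n).headD "" := by
  induction res generalizing n with
  | nil => simp
  | cons x t ih =>
    cases n with
    | zero => simp
    | succ m => simpa using ih m

-- in a (≤)-sorted list the elements < r are exactly the takeWhile (· < r) prefix
theorem sorted_lt_iff (r : String) :
    ∀ (res : List String), res.Pairwise (· ≤ ·) → ∀ i (hi : i < res.length),
      (res[i] < r ↔ i < (res.takeWhile (fun x => decide (x < r))).length) := by
  intro res
  induction res with
  | nil => intro _ i hi; simp at hi
  | cons x t ih =>
    intro hs i hi
    obtain ⟨hx, ht⟩ := List.pairwise_cons.mp hs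
    rw [List.takeWhile_cons]
    by_cases hpx : x < r
    · rw [if_pos (decide_eq_true hpx)]
      cases i with
      | zero => exact iff_of_true hpx (by simp)
      | succ m =>
        have hm : m < t.length := by simpa using hi
        have := ih ht m hm
        simp only [List.getElem_cons_succ, List.length_cons, Nat.succ_lt_succ_iff]
        exact this
    · rw [if_neg (by simpa using hpx)]
      simp only [List.length_nil, Nat.not_lt_zero, iff_false]
      cases i with
      | zero => exact hpx
      | succ m =>
        have hm : m < t.length := by simpa using hi
        have hxm : x ≤ t[m] := hx _ (List.getElem_mem hm)
        have hrx : r ≤ x := le_of_not_gt hpx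
        show ¬ t[m] < r
        exact not_lt_of_ge (le_trans hrx hxm)

-- binary-search correctness: with the loop invariant the loop returns the boundary
theorem bsLoop_eq (res : List String) (r : String) (hs : res.Pairwise (· ≤ ·)) :
    ∀ (n lo hi : Nat), hi - lo ≤ n → hi ≤ res.length →
      lo ≤ (res.takeWhile (fun x => decide (x < r))).length →
      (res.takeWhile (fun x => decide (x < r))).length ≤ hi →
      bsLoop res r lo hi = (res.takeWhile (fun x => decide (x < r))).length := by
  intro n
  induction n with
  | zero =>
    intro lo hi hfuel hhi hlo hup
    rw [bsLoop]
    have h : ¬ lo < hi := by omega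
    simp only [h, if_false]
    omega
  | succ n ih =>
    intro lo hi hfuel hhi hlo hup
    rw [bsLoop]
    by_cases hlt : lo < hi
    · simp only [hlt, if_true]
      have hmid : (lo + hi) / 2 < res.length := by omega
      have hgd : res.getD ((lo + hi) / 2) "" = res[(lo + hi) / 2] :=
        List.getD_eq_getElem res "" hmid
      by_cases hc : res.getD ((lo + hi) / 2) "" < r
      · have hjlt : (lo + hi) / 2 < (res.takeWhile (fun x => decide (x < r))).length := by
          rw [hgd] at hc
          exact (sorted_lt_iff r res hs _ hmid).mp hc
        simp only [hc, if_true]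
        exact ih _ hi (by omega) hhi (by omega) hup
      · have hjle : (res.takeWhile (fun x => decide (x < r))).length ≤ (lo + hi) / 2 := by
          by_contra hlt2
          rw [hgd] at hc
          exact hc ((sorted_lt_iff r res hs _ hmid).mpr (by omega))
        simp only [hc, if_false]
        exact ih lo _ (by omega) (by omega) hlo (by omega)
    · simp only [hlt, if_false]
      omega

-- one insertStep on a strictly sorted list: still strictly sorted, members gain r
theorem insertStep_spec (res : List String) (r : String) (hs : res.Pairwise (· < ·)) :
    (insertStep res r).Pairwise (· < ·) ∧
    (∀ x, x ∈ insertStep res r ↔ x ∈ res ∨ x = r) := by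
  have hsle : res.Pairwise (· ≤ ·) := hs.imp le_of_lt
  have hlen := len_split (fun x => decide (x < r)) res
  set p : String → Bool := fun x => decide (x < r) with hp
  set j := (res.takeWhile p).length with hj
  have hjle : j ≤ res.length := by omega
  have hbs : bsLoop res r 0 res.length = j :=
    bsLoop_eq res r hsle res.length 0 res.length (by omega) le_rfl (by omega) hjle
  have hmemiff : ∀ x, (x ∈ res.takeWhile p ++ res.dropWhile p) ↔ x ∈ res := by
    intro x; rw [List.takeWhile_append_dropWhile]
  have htw_lt : ∀ x ∈ res.takeWhile p, x < r := by
    intro x hx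
    have := List.mem_takeWhile_imp hx
    simpa [hp] using this
  unfold insertStep
  rw [hbs]
  by_cases hcond : j = res.length ∨ res.getD j "" ≠ r
  · simp only [hcond, if_true]
    rw [hj, take_len_takeWhile, drop_len_takeWhile]
    have hdw_gt : ∀ x ∈ res.dropWhile p, r < x := by
      cases hdw : res.dropWhile p with
      | nil => intro x hx; simp at hx
      | cons d dt =>
        have hdne : ¬ p d := by
          have := List.head_dropWhile_not p (l := res) (by simp [hdw])
          simpa [hdw] using this
        have hrd : r ≤ d := by
          simpa [hp] using hdne
        have hdr : d ≠ r := by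
          have hdl : (res.dropWhile p).length = dt.length + 1 := by rw [hdw]; rfl
          have hjlt : j < res.length := by omega
          have hgd : res.getD j "" = d := by
            rw [getD_eq_headD_drop, hj, drop_len_takeWhile, hdw]; rfl
          rcases hcond with h1 | h2
          · omega
          · intro he; exact h2 (by rw [hgd, he])
        have hrd' : r < d := lt_of_le_of_ne hrd (fun h => hdr h.symm)
        have hpw : (d :: dt).Pairwise (· < ·) := by
          rw [← hdw]; exact hs.sublist (List.dropWhile_sublist _)
        intro x hx
        rcases List.mem_cons.mp hx with rfl | hx'
        · exact hrd'
        · exact lt_trans hrd' ((List.pairwise_cons.mp hpw).1 x hx')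
    constructor
    · apply List.pairwise_append.mpr
      refine ⟨hs.sublist (List.takeWhile_sublist _), ?_, ?_⟩
      · exact List.pairwise_cons.mpr ⟨hdw_gt, hs.sublist (List.dropWhile_sublist _)⟩
      · intro a ha b hb
        rcases List.mem_cons.mp hb with rfl | hb'
        · exact htw_lt a ha
        · exact lt_trans (htw_lt a ha) (hdw_gt b hb')
    · intro x
      constructor
      · intro hx
        rcases List.mem_append.mp hx with h | h
        · exact Or.inl ((hmemiff x).mp (List.mem_append_left _ h))
        · rcases List.mem_cons.mp h with rfl | h'
          · exact Or.inr rfl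
          · exact Or.inl ((hmemiff x).mp (List.mem_append_right _ h'))
      · intro hx
        rcases hx with hx | rfl
        · rcases List.mem_append.mp ((hmemiff x).mpr hx) with h | h
          · exact List.mem_append_left _ h
          · exact List.mem_append_right _ (List.mem_cons_of_mem _ h)
        · exact List.mem_append_right _ (List.mem_cons_self ..)
  · simp only [hcond, if_false]
    rw [not_or, not_not] at hcond
    obtain ⟨hjne, hgetr⟩ := hcond
    have hjlt : j < res.length := lt_of_le_of_ne hjle hjne
    have hrmem : r ∈ res := by
      rw [← hgetr, List.getD_eq_getElem res "" hjlt]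
      exact List.getElem_mem _
    refine ⟨hs, fun x => ?_⟩
    constructor
    · exact Or.inl
    · rintro (h | rfl)
      · exact h
      · exact hrmem

-- folding insertStep keeps strict sortedness and accumulates membership
theorem foldl_insertStep_spec (xs : List String) :
    ∀ (res : List String), res.Pairwise (· < ·) →
      (xs.foldl insertStep res).Pairwise (· < ·) ∧
      (∀ x, x ∈ xs.foldl insertStep res ↔ x ∈ res ∨ x ∈ xs) := by
  induction xs with
  | nil =>
    intro res h
    refine ⟨by simpa using h, fun x => ?_⟩
    simp
  | cons y ys ih =>
    intro res h
    obtain ⟨h1, h2⟩ := insertStep_spec res y h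
    obtain ⟨h3, h4⟩ := ih (insertStep res y) h1
    rw [List.foldl_cons]
    refine ⟨h3, fun x => ?_⟩
    rw [h4 x, h2 x]
    simp only [List.mem_cons]
    tauto

-- ===== VERDICT (by name: the statement is the Claim_ definition above) =====
theorem get_relations_set_spec : Claim_equal_get_relations_set := by
  intro dataset _
  unfold Spec_get_relations_set get_relations_set
  rw [flatA_eq, foldB_eq]
  set xs := dataset.flatMap (fun line => line.flatMap (fun token => token)) with hxs
  have hA_pw : (PySem.List.sorted (PySem.Set.ofList xs) (fun x => x) false).Pairwise (· < ·) :=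
    PySem.List.sorted_ofList_pairwise_lt xs
  obtain ⟨hB_pw, hB_mem⟩ := foldl_insertStep_spec xs [] (by simp)
  refine List.Pairwise.eq_of_mem_iff hA_pw hB_pw ?_
  intro a
  rw [hB_mem a]
  simp [PySem.List.mem_sorted, PySem.Set.mem_ofList]
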